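-- pv_equiv track=rewrite | github.com/waynesun09/cicaddy | src/cicaddy/ai_providers/openai.py | _rebuild_messages_from_prompt
-- ===== SOURCE A (Python) =====
-- from typing import Any, Dict, List, Optional
--
-- def _rebuild_messages_from_prompt(prompt: str) -> List[Dict[str, str]]:
--     """Rebuild OpenAI messages from truncated prompt."""
--     messages = []
--     current_role = None
--     current_content = []
--
--     for line in prompt.split("\n"):
--         if (
--             line.startswith("user:")
--             or line.startswith("assistant:")
--             or line.startswith("system:")
--         ):
--             # Save previous message
--             if current_role and current_content:
--                 messages.append(
--                     {
--                         "role": current_role,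
--                         "content": "\n".join(current_content).strip(),
--                     }
--                 )
--
--             # Start new message
--             parts = line.split(":", 1)
--             current_role = parts[0].strip()
--             current_content = [parts[1].strip()] if len(parts) > 1 else []
--         elif current_role:
--             current_content.append(line)
--
--     # Add final message
--     if current_role and current_content:
--         messages.append(
--             {"role": current_role, "content": "\n".join(current_content).strip()}
--         )
--
--     return messages if messages else [{"role": "user", "content": prompt}]
-- ===== SOURCE B (Python) =====
-- from typing import Dict, List
--
--
-- def _is_marker(line: str) -> bool:
--     return line.startswith("user:") or line.startswith("assistant:") or line.startswith("system:")
--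
--
-- def _rebuild_messages_from_prompt(prompt: str) -> List[Dict[str, str]]:
--     """Rebuild OpenAI messages from truncated prompt (segment-slicing rewrite)."""
--     lines = prompt.split("\n")
--     n = len(lines)
--     # skip any lines before the first marker
--     i = 0
--     while i < n and not _is_marker(lines[i]):
--         i += 1
--     if i == n:
--         return [{"role": "user", "content": prompt}]
--     out = []
--     while i < n:
--         role, rest = lines[i].split(":", 1)
--         j = i + 1
--         while j < n and not _is_marker(lines[j]):
--             j += 1
--         content = "\n".join([rest.strip()] + lines[i + 1 : j]).strip()
--         out.append({"role": role.strip(), "content": content})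
--         i = j
--     return out
-- ===== Notes on version B (the rewrite author's own statement) =====
-- stated objective: alternative
-- what changed: Replaces A's single-pass loop that threads a current_role/current_content accumulator with a two-phase segment decomposition: skip lines before the first marker, then cut the line list at each marker line and build one message per slice.
import Mathlib
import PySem

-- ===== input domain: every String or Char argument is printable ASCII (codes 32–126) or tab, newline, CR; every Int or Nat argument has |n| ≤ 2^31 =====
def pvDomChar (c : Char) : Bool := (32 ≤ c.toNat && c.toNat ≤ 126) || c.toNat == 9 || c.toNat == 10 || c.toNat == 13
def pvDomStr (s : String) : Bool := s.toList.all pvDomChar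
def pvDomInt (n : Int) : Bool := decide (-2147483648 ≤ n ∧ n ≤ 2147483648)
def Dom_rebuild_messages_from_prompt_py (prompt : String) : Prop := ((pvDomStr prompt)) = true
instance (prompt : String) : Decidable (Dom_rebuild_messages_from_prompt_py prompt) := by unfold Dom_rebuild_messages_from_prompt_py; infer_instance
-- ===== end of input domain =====

-- B replaces A's single-pass role/content accumulator loop with a segment-based decomposition:
-- skip lines before the first marker, then cut the line list at each marker and build one message
-- per segment (objective: alternative decomposition, same cost).

-- ===== PORT A =====
-- state: (messages, current_role, current_content)
def pyA_step (st : List (List (String × String)) × Option String × List String) (line : String) :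
    List (List (String × String)) × Option String × List String :=
  if (PySem.Str.startswith line "user:" || PySem.Str.startswith line "assistant:"
      || PySem.Str.startswith line "system:") then
    -- save previous message
    let msgs' :=
      match st.2.1 with
      | some r =>
          if r ≠ "" ∧ st.2.2 ≠ [] then
            st.1 ++ [[("role", r), ("content", PySem.Str.strip (PySem.Str.join "\n" st.2.2))]]
          else st.1
      | none => st.1
    -- start new message: parts = line.split(":", 1)
    match (PySem.Str.splitMax? line ":" 1).getD [] with
    | p0 :: p1 :: _ => (msgs', some (PySem.Str.strip p0), [PySem.Str.strip p1])
    | p0 :: [] => (msgs', some (PySem.Str.strip p0), ([] : List String))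
    | [] => (msgs', none, [])          -- unreachable: split(sep, 1) is never empty
  else
    match st.2.1 with
    | some r => if r ≠ "" then (st.1, st.2.1, st.2.2 ++ [line]) else st
    | none => st

def rebuild_messages_from_prompt_py (prompt : String) : List (List (String × String)) :=
  let lines := (PySem.Str.split? prompt "\n").getD []
  let st := lines.foldl pyA_step ([], none, [])
  -- add final message
  let msgs :=
    match st.2.1 with
    | some r =>
        if r ≠ "" ∧ st.2.2 ≠ [] then
          st.1 ++ [[("role", r), ("content", PySem.Str.strip (PySem.Str.join "\n" st.2.2))]]
        else st.1
    | none => st.1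
  if msgs ≠ [] then msgs else [[("role", "user"), ("content", prompt)]]

-- ===== PORT B =====
def pyB_isMarker (line : String) : Bool :=
  PySem.Str.startswith line "user:" || PySem.Str.startswith line "assistant:"
    || PySem.Str.startswith line "system:"

-- one message per segment; a segment starts at a marker line and runs to the next marker
def pyB_segs : List String → List (List (String × String))
  | [] => []
  | h :: t =>
    let body := t.takeWhile (fun l => !pyB_isMarker l)
    let rest := t.dropWhile (fun l => !pyB_isMarker l)
    let rp : String × String :=
      match (PySem.Str.splitMax? h ":" 1).getD [] with
      | p0 :: p1 :: _ => (p0, p1)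
      | p0 :: [] => (p0, "")
      | [] => ("", "")                 -- unreachable: split(sep, 1) is never empty
    [("role", PySem.Str.strip rp.1),
     ("content", PySem.Str.strip (PySem.Str.join "\n" (PySem.Str.strip rp.2 :: body)))]
      :: pyB_segs rest
termination_by l => l.length
decreasing_by simpa using Nat.lt_succ_of_le (List.length_dropWhile_le _ _)

def rebuild_messages_from_prompt_py_alt (prompt : String) : List (List (String × String)) :=
  let lines := (PySem.Str.split? prompt "\n").getD []
  let rest := lines.dropWhile (fun l => !pyB_isMarker l)
  if rest.isEmpty then [[("role", "user"), ("content", prompt)]] else pyB_segs rest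

-- ===== PRECONDITION & SPEC =====
def Spec_rebuild_messages_from_prompt_py (prompt : String) (out : List (List (String × String))) : Prop := out = rebuild_messages_from_prompt_py_alt prompt
instance (prompt : String) (out : List (List (String × String))) : Decidable (Spec_rebuild_messages_from_prompt_py prompt out) := by unfold Spec_rebuild_messages_from_prompt_py; infer_instance

-- ===== CLAIM (what is proved, stated in full; the proofs are below) =====
def Claim_equal_rebuild_messages_from_prompt_py : Prop := ∀ (prompt : String), Dom_rebuild_messages_from_prompt_py prompt → Spec_rebuild_messages_from_prompt_py prompt (rebuild_messages_from_prompt_py prompt)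

-- ===== LEMMAS AND PROOFS =====

-- the "add final message" step of A, as a function of the loop state
def pvFinalize (st : List (List (String × String)) × Option String × List String) :
    List (List (String × String)) :=
  match st.2.1 with
  | some r =>
      if r ≠ "" ∧ st.2.2 ≠ [] then
        st.1 ++ [[("role", r), ("content", PySem.Str.strip (PySem.Str.join "\n" st.2.2))]]
      else st.1
  | none => st.1

theorem pv_go_m0 (sep : List Char) (fuel : Nat) (l cur : List Char) (acc : List (List Char)) :
    PySem.Chars.splitOnMax.go sep fuel 0 l cur acc = ((cur.reverse ++ l) :: acc).reverse := by
  cases fuel with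
  | zero => simp [PySem.Chars.splitOnMax.go]
  | succ f => cases l with
    | nil => simp [PySem.Chars.splitOnMax.go]
    | cons c rest => simp [PySem.Chars.splitOnMax.go]

theorem pv_go_split1 (pre : List Char) (h : ':' ∉ pre) :
    ∀ (fuel : Nat) (suf cur : List Char) (acc : List (List Char)), pre.length + 1 ≤ fuel →
    PySem.Chars.splitOnMax.go [':'] fuel 1 (pre ++ ':' :: suf) cur acc
      = acc.reverse ++ [cur.reverse ++ pre, suf] := by
  induction pre with
  | nil =>
    intro fuel suf cur acc hf
    cases fuel with
    | zero => omega
    | succ f =>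
      simp only [List.nil_append]
      rw [show PySem.Chars.splitOnMax.go [':'] (f+1) 1 (':' :: suf) cur acc
            = PySem.Chars.splitOnMax.go [':'] f 0 (List.drop 1 (':' :: suf)) [] (cur.reverse :: acc) from by
        simp [PySem.Chars.splitOnMax.go, List.isPrefixOf]]
      rw [pv_go_m0]; simp
  | cons c pre ih =>
    intro fuel suf cur acc hf
    cases fuel with
    | zero => simp at hf
    | succ f =>
      have hc : c ≠ ':' := fun hc => h (by simp [hc])
      rw [show PySem.Chars.splitOnMax.go [':'] (f+1) 1 ((c :: pre) ++ ':' :: suf) cur acc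
            = PySem.Chars.splitOnMax.go [':'] f 1 (pre ++ ':' :: suf) (c :: cur) acc from by
        simp [PySem.Chars.splitOnMax.go, List.isPrefixOf]
        intro h'; exact absurd h'.symm hc]
      rw [ih (fun hm => h (List.mem_cons_of_mem _ hm)) f suf (c :: cur) acc (by simp at hf ⊢; omega)]
      simp

-- s.split(":", 1) on a string whose text before the first colon is `pre`
theorem pv_split1_chars (pre suf : List Char) (h : ':' ∉ pre) :
    PySem.Chars.splitOnMax (pre ++ ':' :: suf) [':'] 1 = [pre, suf] := by
  unfold PySem.Chars.splitOnMax
  rw [if_neg (by norm_num)]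
  simp only [Int.toNat_one]
  rw [pv_go_split1 pre h _ suf [] [] (by simp)]
  simp

-- a marker line splits into a known role and the text after the first colon
theorem pv_marker_split (l : String) (h : pyB_isMarker l = true) :
    ∃ (role : String) (rest : List Char),
      (PySem.Str.splitMax? l ":" 1).getD [] = [role, String.ofList rest]
        ∧ PySem.Str.strip role = role ∧ role ≠ "" := by
  unfold pyB_isMarker at h
  simp only [Bool.or_eq_true, PySem.Str.startswith, PySem.Chars.startswith_iff] at h
  have key : ∀ (pre : List Char), ':' ∉ pre →
      (pre ++ [':']) <+: l.toList →
      ∃ rest, (PySem.Str.splitMax? l ":" 1).getD []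
        = [String.ofList pre, String.ofList rest] := by
    intro pre hpre hp
    obtain ⟨t, ht⟩ := hp
    refine ⟨t, ?_⟩
    unfold PySem.Str.splitMax? PySem.Chars.splitMax?
    rw [show (":".toList) = [':'] from rfl]
    rw [show l.toList = pre ++ ':' :: t from by rw [← ht]; simp]
    simp [pv_split1_chars pre t hpre]
  rcases h with (h | h) | h
  · obtain ⟨rest, hr⟩ := key "user".toList (by decide) (by simpa using h)
    exact ⟨"user", rest, hr, by decide, by decide⟩
  · obtain ⟨rest, hr⟩ := key "assistant".toList (by decide) (by simpa using h)
    exact ⟨"assistant", rest, hr, by decide, by decide⟩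
  · obtain ⟨rest, hr⟩ := key "system".toList (by decide) (by simpa using h)
    exact ⟨"system", rest, hr, by decide, by decide⟩

-- main loop invariant: with a (nonempty) role set and a nonempty content accumulator,
-- A's remaining loop + final step produce exactly B's segments
theorem pv_L1 (lines : List String) :
    ∀ (msgs : List (List (String × String))) (r : String) (acc : List String),
    r ≠ "" → acc ≠ [] →
    pvFinalize (lines.foldl pyA_step (msgs, some r, acc))
      = msgs ++ ([("role", r),
          ("content", PySem.Str.strip (PySem.Str.join "\n"
            (acc ++ lines.takeWhile (fun l => !pyB_isMarker l))))]
        :: pyB_segs (lines.dropWhile (fun l => !pyB_isMarker l))) := by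
  induction lines with
  | nil => intro msgs r acc hr ha; simp [pvFinalize, hr, ha, pyB_segs]
  | cons l ls ih =>
    intro msgs r acc hr ha
    by_cases hm : pyB_isMarker l = true
    · obtain ⟨role, rest, hsplit, hstrip, hne⟩ := pv_marker_split l hm
      have hstep : pyA_step (msgs, some r, acc) l
          = (msgs ++ [[("role", r), ("content", PySem.Str.strip (PySem.Str.join "\n" acc))]],
             some role, [PySem.Str.strip (String.ofList rest)]) := by
        unfold pyA_step
        rw [if_pos (by exact hm)]
        simp only [hsplit, hstrip]
        simp [hr, ha]
      rw [List.foldl_cons, hstep,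
        ih _ role _ hne (by simp)]
      rw [List.takeWhile_cons_of_neg (by simp [hm]),
        List.dropWhile_cons_of_neg (by simp [hm])]
      rw [pyB_segs]
      simp [hsplit, hstrip]
    · have hm' : pyB_isMarker l = false := by simpa using hm
      have hstep : pyA_step (msgs, some r, acc) l = (msgs, some r, acc ++ [l]) := by
        unfold pyA_step
        rw [if_neg (by simpa [pyB_isMarker] using hm')]
        simp [hr]
      rw [List.foldl_cons, hstep, ih _ r _ hr (by simp)]
      rw [List.takeWhile_cons_of_pos (by simp [hm']),
        List.dropWhile_cons_of_pos (by simp [hm'])]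
      simp

-- before the first marker A ignores every line; from the first marker on, pv_L1 applies
theorem pv_L0 (lines : List String) :
    pvFinalize (lines.foldl pyA_step ([], none, []))
      = pyB_segs (lines.dropWhile (fun l => !pyB_isMarker l)) := by
  induction lines with
  | nil => simp [pvFinalize, pyB_segs]
  | cons l ls ih =>
    by_cases hm : pyB_isMarker l = true
    · obtain ⟨role, rest, hsplit, hstrip, hne⟩ := pv_marker_split l hm
      have hstep : pyA_step ([], none, []) l
          = ([], some role, [PySem.Str.strip (String.ofList rest)]) := by
        unfold pyA_step
        rw [if_pos (by exact hm)]
        simp only [hsplit, hstrip]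
      rw [List.foldl_cons, hstep, pv_L1 ls [] role _ hne (by simp)]
      rw [List.dropWhile_cons_of_neg (by simp [hm])]
      rw [pyB_segs]
      simp [hsplit, hstrip]
    · have hm' : pyB_isMarker l = false := by simpa using hm
      have hstep : pyA_step ([], none, []) l = ([], none, []) := by
        unfold pyA_step
        rw [if_neg (by simpa [pyB_isMarker] using hm')]
      rw [List.foldl_cons, hstep, ih,
        List.dropWhile_cons_of_pos (by simp [hm'])]

-- ===== VERDICT (by name: the statement is the Claim_ definition above) =====
theorem rebuild_messages_from_prompt_py_spec : Claim_equal_rebuild_messages_from_prompt_py := by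
  intro prompt _
  show _ = rebuild_messages_from_prompt_py_alt prompt
  have key : rebuild_messages_from_prompt_py prompt
      = (if pvFinalize (((PySem.Str.split? prompt "\n").getD []).foldl pyA_step ([], none, []))
            ≠ [] then
          pvFinalize (((PySem.Str.split? prompt "\n").getD []).foldl pyA_step ([], none, []))
        else [[("role", "user"), ("content", prompt)]]) := rfl
  rw [key, pv_L0]
  cases hrest : ((PySem.Str.split? prompt "\n").getD []).dropWhile (fun l => !pyB_isMarker l) with
  | nil =>
    simp [rebuild_messages_from_prompt_py_alt, hrest, pyB_segs]
  | cons x t =>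
    rw [pyB_segs]
    simp only [rebuild_messages_from_prompt_py_alt]
    rw [hrest, pyB_segs]
    simp
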